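-- pv_equiv track=rewrite | github.com/SyNSec-den/5GBaseChecker | DevScan/fsm_checking/fsm_equivalence_checker_5GBaseChecker/graph.py | getTracefrompath
-- ===== SOURCE A (Python) =====
-- def getTracefrompath(fsm_list, all_path):
--     # this function will return 2 lists contains all deviant queries and corresponding output
--
--     all_input_traces = [] # this is the return value
--     all_output_traces = []
--
--     for item in all_path: #item is a single list
--         single_input_trace = []
--         single_output_trace = []
--         for i in range(len(item)-1): # each round get one deviant trace and append
--             state1_num = item[i]
--             state2_num = item[i+1] # each time we get 2 states out and search them in the list, see what's the input/output
--             state1 = str(state1_num)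
--             state2 = str(state2_num)
--             for transitions in fsm_list:
--                 if transitions[0] == state1 and transitions[3] == state2:
--                     deviant_input = transitions[1]
--                     deviant_output = transitions[2]
--                     single_input_trace.append(deviant_input)
--                     single_output_trace.append(deviant_output)
--                     # break # ?
--         all_input_traces.append(single_input_trace) # final return value here
--         all_output_traces.append(single_output_trace)
--
--     return all_input_traces, all_output_traces
-- ===== SOURCE B (Python) =====
-- def getTracefrompath(fsm_list, all_path):
--     # Precompute an index keyed by (source_state, dest_state) -> ordered list of
--     # (input, output) pairs, then walk each path's edges with O(1) lookups.
--     index = {}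
--     for t in fsm_list:
--         if len(t) >= 4:
--             key = (t[0], t[3])
--             index[key] = index.get(key, []) + [(t[1], t[2])]
--     all_input_traces = []
--     all_output_traces = []
--     for path in all_path:
--         ins = []
--         outs = []
--         for a, b in zip(path, path[1:]):
--             for di, do in index.get((str(a), str(b)), []):
--                 ins.append(di)
--                 outs.append(do)
--         all_input_traces.append(ins)
--         all_output_traces.append(outs)
--     return all_input_traces, all_output_traces
-- ===== Notes on version B (the rewrite author's own statement) =====
-- stated objective: faster
-- what changed: B precomputes a dict keyed by (source,dest) state pair mapping to the ordered list of (input,output) transition labels, so each path edge is one average-O(1) lookup instead of a full scan of fsm_list; A raises IndexError on transition rows shorter than 4 entries that it reaches, and exactly those inputs are outside Pre_.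
import Mathlib
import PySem

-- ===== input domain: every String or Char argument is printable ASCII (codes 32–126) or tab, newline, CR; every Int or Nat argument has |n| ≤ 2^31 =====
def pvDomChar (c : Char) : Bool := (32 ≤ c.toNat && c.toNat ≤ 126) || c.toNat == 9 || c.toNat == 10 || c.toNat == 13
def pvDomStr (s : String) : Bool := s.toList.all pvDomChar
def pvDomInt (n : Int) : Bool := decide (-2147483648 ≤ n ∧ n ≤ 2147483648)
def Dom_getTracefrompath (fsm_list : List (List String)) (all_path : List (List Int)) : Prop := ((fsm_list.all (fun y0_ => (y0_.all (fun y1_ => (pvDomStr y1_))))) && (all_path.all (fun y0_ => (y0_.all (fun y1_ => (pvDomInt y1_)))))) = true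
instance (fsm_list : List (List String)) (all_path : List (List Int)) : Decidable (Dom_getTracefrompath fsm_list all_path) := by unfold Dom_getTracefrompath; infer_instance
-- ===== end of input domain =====

-- B replaces A's per-edge scan of fsm_list by a precomputed (source,dest)-keyed dict of
-- ordered (input,output) lists; measurably faster when fsm_list is large (asymptotic change).

-- ===== PORT A =====
-- literal transliteration of A; inside Pre_ every evaluated index is in range, so pyGetD's
-- defaults are never the value Python would not compute (short-circuit `&&` mirrors Python's `and`)
def getTracefrompath (fsm_list : List (List String)) (all_path : List (List Int)) : List (List String) × List (List String) :=
  all_path.foldl (fun (acc : List (List String) × List (List String)) item =>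
    let tr := (PySem.List.pyRange 0 ((item.length : Int) - 1) 1).foldl
      (fun (st : List String × List String) i =>
        let state1 := PySem.Int.toStr (PySem.List.pyGetD item i 0)
        let state2 := PySem.Int.toStr (PySem.List.pyGetD item (i + 1) 0)
        fsm_list.foldl (fun (st2 : List String × List String) transitions =>
          if (PySem.List.pyGetD transitions 0 "" == state1) && (PySem.List.pyGetD transitions 3 "" == state2) then
            (st2.1 ++ [PySem.List.pyGetD transitions 1 ""], st2.2 ++ [PySem.List.pyGetD transitions 2 ""])
          else st2) st) (([] : List String), ([] : List String))
    (acc.1 ++ [tr.1], acc.2 ++ [tr.2])) ([], [])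

-- ===== PORT B =====
-- index[key] = index.get(key, []) + [(t[1], t[2])]  is Dict.modify key [] (· ++ [(t[1], t[2])])
def pvIndex (fsm_list : List (List String)) : PySem.Dict (String × String) (List (String × String)) :=
  fsm_list.foldl (fun d t =>
    if 4 ≤ t.length then
      d.modify (t.getD 0 "", t.getD 3 "") [] (fun l => l ++ [(t.getD 1 "", t.getD 2 "")])
    else d) PySem.Dict.empty

def getTracefrompath_alt (fsm_list : List (List String)) (all_path : List (List Int)) : List (List String) × List (List String) :=
  let index := pvIndex fsm_list
  all_path.foldl (fun (acc : List (List String) × List (List String)) path =>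
    let pr := (path.zip path.tail).foldl
      (fun (st : List String × List String) ab =>
        (index.getD (PySem.Int.toStr ab.1, PySem.Int.toStr ab.2) []).foldl
          (fun (st2 : List String × List String) e => (st2.1 ++ [e.1], st2.2 ++ [e.2])) st)
      (([] : List String), ([] : List String))
    (acc.1 ++ [pr.1], acc.2 ++ [pr.2])) ([], [])

-- ===== PRECONDITION & SPEC =====
-- Pre_ excludes exactly the inputs on which A raises IndexError: a transition row that is empty,
-- or shorter than 4 while its first entry equals the string of some traversed source state.
def Pre_getTracefrompath (fsm_list : List (List String)) (all_path : List (List Int)) : Prop :=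
  ∀ p ∈ all_path, ∀ pr ∈ p.zip p.tail, ∀ t ∈ fsm_list,
    t ≠ [] ∧ (t.length < 4 → t.head? ≠ some (PySem.Int.toStr pr.1))
instance (fsm_list : List (List String)) (all_path : List (List Int)) : Decidable (Pre_getTracefrompath fsm_list all_path) := by unfold Pre_getTracefrompath; infer_instance

def pvWitness_getTracefrompath : List (List String) × List (List Int) :=
  ([["0", "enable", "ok", "1"], ["1", "reject", "null", "0"]], [[0, 1, 0]])

def Spec_getTracefrompath (fsm_list : List (List String)) (all_path : List (List Int)) (out : List (List String) × List (List String)) : Prop := out = getTracefrompath_alt fsm_list all_path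
instance (fsm_list : List (List String)) (all_path : List (List Int)) (out : List (List String) × List (List String)) : Decidable (Spec_getTracefrompath fsm_list all_path out) := by unfold Spec_getTracefrompath; infer_instance

-- ===== CLAIM (what is proved, stated in full; the proofs are below) =====
def Claim_equal_getTracefrompath : Prop := ∀ (fsm_list : List (List String)) (all_path : List (List Int)), Dom_getTracefrompath fsm_list all_path → Pre_getTracefrompath fsm_list all_path → Spec_getTracefrompath fsm_list all_path (getTracefrompath fsm_list all_path)

-- ===== LEMMAS AND PROOFS =====

-- the (input,output) pairs A's inner scan collects for one edge (s1, s2)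
def pvMatches (fsm_list : List (List String)) (s1 s2 : String) : List (String × String) :=
  fsm_list.filterMap (fun t =>
    if (PySem.List.pyGetD t 0 "" == s1) && (PySem.List.pyGetD t 3 "" == s2) then
      some (PySem.List.pyGetD t 1 "", PySem.List.pyGetD t 2 "")
    else none)

theorem pvInnerA (fsm_list : List (List String)) (s1 s2 : String) :
    ∀ st : List String × List String,
      fsm_list.foldl (fun (st2 : List String × List String) transitions =>
          if (PySem.List.pyGetD transitions 0 "" == s1) && (PySem.List.pyGetD transitions 3 "" == s2) then
            (st2.1 ++ [PySem.List.pyGetD transitions 1 ""], st2.2 ++ [PySem.List.pyGetD transitions 2 ""])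
          else st2) st
      = (st.1 ++ (pvMatches fsm_list s1 s2).map Prod.fst,
         st.2 ++ (pvMatches fsm_list s1 s2).map Prod.snd) := by
  induction fsm_list with
  | nil => intro st; simp [pvMatches]
  | cons t rest ih =>
    intro st
    simp only [List.foldl_cons, pvMatches, List.filterMap_cons]
    by_cases h : ((PySem.List.pyGetD t 0 "" == s1) && (PySem.List.pyGetD t 3 "" == s2)) = true
    · simp only [h, if_true, ih, pvMatches, List.map_cons]
      simp
    · simp only [Bool.not_eq_true] at h
      simp only [h, Bool.false_eq_true, if_false, ih, pvMatches]

theorem pvInnerB (l : List (String × String)) :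
    ∀ st : List String × List String,
      l.foldl (fun (st2 : List String × List String) e => (st2.1 ++ [e.1], st2.2 ++ [e.2])) st
      = (st.1 ++ l.map Prod.fst, st.2 ++ l.map Prod.snd) := by
  induction l with
  | nil => intro st; simp
  | cons e rest ih => intro st; simp [ih]

-- what one row contributes to the index at key k
def pvEnt (k : String × String) (t : List String) : Option (String × String) :=
  if 4 ≤ t.length ∧ (t.getD 0 "", t.getD 3 "") = k then some (t.getD 1 "", t.getD 2 "") else none

theorem pvIndex_getD_aux (fsm_list : List (List String)) (k : String × String) :
    ∀ d : PySem.Dict (String × String) (List (String × String)),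
      (fsm_list.foldl (fun d t =>
        if 4 ≤ t.length then
          d.modify (t.getD 0 "", t.getD 3 "") [] (fun l => l ++ [(t.getD 1 "", t.getD 2 "")])
        else d) d).getD k []
      = d.getD k [] ++ fsm_list.filterMap (pvEnt k) := by
  induction fsm_list with
  | nil => intro d; simp
  | cons t rest ih =>
    intro d
    simp only [List.foldl_cons, List.filterMap_cons]
    by_cases hl : 4 ≤ t.length
    · simp only [hl, if_true, ih, PySem.Dict.getD_modify]
      by_cases hk : (t.getD 0 "", t.getD 3 "") = k
      · subst hk; simp [pvEnt, hl]
      · simp only [List.getD_eq_getElem?_getD] at hk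
        simp [pvEnt, hl, hk, Ne.symm hk]
    · simp only [hl, if_false, ih, pvEnt]
      simp

theorem pvIndex_getD (fsm_list : List (List String)) (k : String × String) :
    (pvIndex fsm_list).getD k [] = fsm_list.filterMap (pvEnt k) := by
  unfold pvIndex
  rw [pvIndex_getD_aux]
  simp

-- under Pre_'s row condition, A's match test and B's index entry agree row by row
theorem pvEntry_eq (t : List String) (s1 s2 : String)
    (hne : t ≠ []) (hshort : t.length < 4 → t.head? ≠ some s1) :
    (if (PySem.List.pyGetD t 0 "" == s1) && (PySem.List.pyGetD t 3 "" == s2) then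
        some (PySem.List.pyGetD t 1 "", PySem.List.pyGetD t 2 "")
      else none)
    = pvEnt (s1, s2) t := by
  unfold pvEnt
  rw [PySem.List.pyGetD_ofNat' t 0 "", PySem.List.pyGetD_ofNat' t 1 "",
      PySem.List.pyGetD_ofNat' t 2 "", PySem.List.pyGetD_ofNat' t 3 ""]
  by_cases hl : 4 ≤ t.length
  · by_cases hA : t.getD 0 "" = s1 <;> by_cases hB : t.getD 3 "" = s2 <;>
      simp [hA, hB, hl, Prod.ext_iff]
  · -- short row: Pre_ makes A's first comparison false; B's guard rejects the row too
    replace hl : (t.length : Nat) < 4 := by omega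
    obtain ⟨a, rest, rfl⟩ := List.exists_cons_of_ne_nil hne
    have ha : a ≠ s1 := by
      intro h; exact (hshort hl) (by simp [h])
    have hlen : ¬ (4 ≤ (a :: rest).length) := by omega
    simp [ha, hlen]

-- the pair list A indexes with equals zip(path, path[1:])
theorem pvPairs (item : List Int) :
    (PySem.List.pyRange 0 ((item.length : Int) - 1) 1).map
      (fun i => (PySem.List.pyGetD item i 0, PySem.List.pyGetD item (i + 1) 0))
    = item.zip item.tail := by
  rw [PySem.List.pyRange_one, List.map_map]
  apply List.ext_getElem
  · simp [List.length_zip]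
  · intro n h1 h2
    simp only [List.getElem_map, List.getElem_range, Function.comp_apply]
    have hn : n < item.length - 1 := by simp at h1; omega
    have e1 : PySem.List.pyGetD item ((0 : Int) + (n : Int)) 0 = item.getD n 0 := by
      simpa using PySem.List.pyGetD_natCast (xs := item) (n := n) (d := 0)
    have e2 : PySem.List.pyGetD item ((0 : Int) + (n : Int) + 1) 0 = item.getD (n + 1) 0 := by
      have h : (0 : Int) + (n : Int) + 1 = ((n + 1 : Nat) : Int) := by push_cast; ring
      rw [h]
      simpa using PySem.List.pyGetD_natCast (xs := item) (n := n + 1) (d := 0)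
    rw [e1, e2]
    rcases item with _ | ⟨x, xs⟩
    · exact absurd h2 (by simp)
    · have hx : n < xs.length := by simp at hn; omega
      simp only [List.tail_cons]
      rw [List.getElem_zip]
      refine Prod.ext ?_ ?_ <;>
        simp [List.getD_eq_getElem?_getD, List.getElem?_eq_getElem, hx,
          (show n < xs.length + 1 by omega), (show n + 1 < xs.length + 1 by omega)] <;>
        rfl

-- ===== VERDICT =====
theorem getTracefrompath_spec : Claim_equal_getTracefrompath := by
  intro fsm_list all_path _hDom hPre
  unfold Spec_getTracefrompath getTracefrompath getTracefrompath_alt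
  apply PySem.List.foldl_congr_mem
  intro acc p hp
  have hbody :
      (PySem.List.pyRange 0 ((p.length : Int) - 1) 1).foldl
        (fun (st : List String × List String) i =>
          let state1 := PySem.Int.toStr (PySem.List.pyGetD p i 0)
          let state2 := PySem.Int.toStr (PySem.List.pyGetD p (i + 1) 0)
          fsm_list.foldl (fun (st2 : List String × List String) transitions =>
            if (PySem.List.pyGetD transitions 0 "" == state1) && (PySem.List.pyGetD transitions 3 "" == state2) then
              (st2.1 ++ [PySem.List.pyGetD transitions 1 ""], st2.2 ++ [PySem.List.pyGetD transitions 2 ""])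
            else st2) st) (([] : List String), ([] : List String))
      = (p.zip p.tail).foldl
        (fun (st : List String × List String) ab =>
          ((pvIndex fsm_list).getD (PySem.Int.toStr ab.1, PySem.Int.toStr ab.2) []).foldl
            (fun (st2 : List String × List String) e => (st2.1 ++ [e.1], st2.2 ++ [e.2])) st)
        (([] : List String), ([] : List String)) := by
    rw [← pvPairs p, List.foldl_map]
    apply PySem.List.foldl_congr_mem
    intro st i hi
    have hpr := hPre p hp (PySem.List.pyGetD p i 0, PySem.List.pyGetD p (i + 1) 0) (by
      rw [← pvPairs p]; exact List.mem_map_of_mem hi)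
    simp only
    rw [pvInnerA, pvInnerB, pvIndex_getD]
    have : pvMatches fsm_list (PySem.Int.toStr (PySem.List.pyGetD p i 0))
        (PySem.Int.toStr (PySem.List.pyGetD p (i + 1) 0))
        = fsm_list.filterMap (pvEnt (PySem.Int.toStr (PySem.List.pyGetD p i 0),
            PySem.Int.toStr (PySem.List.pyGetD p (i + 1) 0))) := by
      unfold pvMatches
      apply List.filterMap_congr
      intro t ht
      exact pvEntry_eq t _ _ (hpr t ht).1 (hpr t ht).2
    rw [this]
  simp only [hbody]
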